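-- pv_equiv track=rewrite | github.com/clarisse-oyharcabal/my-calculator | functions/parse.py | parse
-- ===== SOURCE A (Python) =====
-- def parse(operation):
--     operation = operation.strip()
--
--     number_1 = ""
--     operator = ""
--     number_2 = ""
--     operator_found = False
--
--     if operation[0] == "-":
--         number_1 = operation[0]
--         operation = operation[1:]
--
--     for char in operation:
--         if char in "+-*/er" and not operator_found:
--             operator = char
--             operator_found = True
--         elif not operator_found:
--             number_1 += char
--         else:
--             number_2 += char
--
--     return number_1, operator, number_2
-- ===== SOURCE B (Python) =====
-- def parse(operation):
--     operation = operation.strip()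
--     prefix = ""
--     if operation[0] == "-":
--         prefix = operation[0]
--         operation = operation[1:]
--     for i, ch in enumerate(operation):
--         if ch in "+-*/er":
--             return prefix + operation[:i], ch, operation[i + 1:]
--     return prefix + operation, "", ""
-- ===== Notes on version B (the rewrite author's own statement) =====
-- stated objective: simpler
-- what changed: Replaces the char-by-char accumulation with an operator_found flag by a scan that finds the first operator position and returns slices of the string around it.
import Mathlib
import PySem

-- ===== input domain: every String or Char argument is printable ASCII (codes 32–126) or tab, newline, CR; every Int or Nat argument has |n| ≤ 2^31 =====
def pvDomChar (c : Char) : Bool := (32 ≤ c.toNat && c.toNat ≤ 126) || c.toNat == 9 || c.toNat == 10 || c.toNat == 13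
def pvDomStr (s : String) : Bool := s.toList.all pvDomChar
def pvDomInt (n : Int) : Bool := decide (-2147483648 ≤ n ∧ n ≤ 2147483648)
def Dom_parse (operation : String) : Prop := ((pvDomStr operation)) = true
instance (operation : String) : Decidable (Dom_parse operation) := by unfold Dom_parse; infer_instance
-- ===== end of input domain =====

-- B replaces A's char-by-char accumulation with an operator_found flag by
-- find-the-first-operator then split; objective: simpler. Equal on Pre_ (A and B
-- raise IndexError when the stripped input is empty).


-- ===== PORT A =====
-- char in "+-*/er"
def pvOpChar (c : Char) : Bool :=
  c = '+' || c = '-' || c = '*' || c = '/' || c = 'e' || c = 'r'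

-- the loop body of A: state (number_1, operator, number_2, operator_found)
def parseStepA (st : List Char × List Char × List Char × Bool) (c : Char) :
    List Char × List Char × List Char × Bool :=
  match st with
  | (n1, op, n2, found) =>
    if pvOpChar c && !found then (n1, [c], n2, true)
    else if !found then (n1 ++ [c], op, n2, found)
    else (n1, op, n2 ++ [c], found)

def parse (operation : String) : String × String × String :=
  let s := (PySem.Str.strip operation).toList
  let p := if s.head? = some '-' then (['-'], s.tail) else (([] : List Char), s)
  let r := p.2.foldl parseStepA (p.1, [], [], false)
  (String.ofList r.1, String.ofList r.2.1, String.ofList r.2.2.1)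

-- ===== PORT B =====
-- B's scan: first operator position, returning (chars before, operator, chars after)
def parseSplitB : List Char → Option (List Char × Char × List Char)
  | [] => none
  | c :: cs =>
    if pvOpChar c then some ([], c, cs)
    else
      match parseSplitB cs with
      | some (pre, o, post) => some (c :: pre, o, post)
      | none => none

def parse_alt (operation : String) : String × String × String :=
  let s := (PySem.Str.strip operation).toList
  let p := if s.head? = some '-' then (['-'], s.tail) else (([] : List Char), s)
  match parseSplitB p.2 with
  | some (n1, o, n2) => (String.ofList (p.1 ++ n1), String.ofList [o], String.ofList n2)
  | none => (String.ofList (p.1 ++ p.2), "", "")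

-- ===== PRECONDITION & SPEC =====
-- Pre_ excludes inputs that strip to the empty string, on which A raises IndexError
-- at operation[0] (B raises there too).
def Pre_parse (operation : String) : Prop := PySem.Str.strip operation ≠ ""
instance (operation : String) : Decidable (Pre_parse operation) := by unfold Pre_parse; infer_instance
def pvWitness_parse : String := "-12+34"
def Spec_parse (operation : String) (out : String × String × String) : Prop := out = parse_alt operation
instance (operation : String) (out : String × String × String) : Decidable (Spec_parse operation out) := by unfold Spec_parse; infer_instance

-- ===== CLAIM (what is proved, stated in full; the proofs are below) =====
def Claim_equal_parse : Prop := ∀ (operation : String), Dom_parse operation → Pre_parse operation → Spec_parse operation (parse operation)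

-- ===== LEMMAS AND PROOFS =====

-- once the operator is found, A only appends to number_2
theorem foldA_found (l : List Char) (n1 op n2 : List Char) :
    l.foldl parseStepA (n1, op, n2, true) = (n1, op, n2 ++ l, true) := by
  induction l generalizing n2 with
  | nil => simp
  | cons c cs ih =>
    simp only [List.foldl_cons, parseStepA, Bool.and_false, Bool.not_true]
    simp [ih]

-- A's fold (before the operator is found) computes exactly B's split
theorem foldA_eq_split (l : List Char) (n1 : List Char) :
    l.foldl parseStepA (n1, [], [], false) =
      match parseSplitB l with
      | some (pre, o, post) => (n1 ++ pre, [o], post, true)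
      | none => (n1 ++ l, [], [], false) := by
  induction l generalizing n1 with
  | nil => simp [parseSplitB]
  | cons c cs ih =>
    by_cases hc : pvOpChar c
    · simp [parseStepA, parseSplitB, hc, foldA_found]
    · simp only [List.foldl_cons, parseStepA, hc, Bool.false_and, Bool.false_eq_true, Bool.not_false, if_true,
        if_false, parseSplitB]
      rw [ih (n1 ++ [c])]
      cases h : parseSplitB cs with
      | none => simp [h]
      | some t => rcases t with ⟨pre, o, post⟩; simp [h]

-- ===== VERDICT (by name: the statement is the Claim_ definition above) =====
theorem parse_spec : Claim_equal_parse := by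
  intro operation _ _
  unfold Spec_parse parse parse_alt
  simp only [foldA_eq_split]
  cases h : parseSplitB (if ((PySem.Str.strip operation).toList.head? = some '-') then
      (['-'], (PySem.Str.strip operation).toList.tail)
    else (([] : List Char), (PySem.Str.strip operation).toList)).2 with
  | none => simp [h]
  | some t => rcases t with ⟨pre, o, post⟩; simp [h]
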